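-- pv_equiv track=rewrite | github.com/pypi-data/pypi-mirror-374 | packages/agent-expert-panel/agent_expert_panel-0.5.2.tar.gz/agent_expert_panel-0.5.2/src/agent_expert_panel/agents/mai_dxo/stakeholder_steward.py | _identify_interest_alignments
-- ===== SOURCE A (Python) =====
-- from typing import Any, Dict, List
--
-- def _identify_interest_alignments(
--     interests1: List[str], interests2: List[str]
-- ) -> List[str]:
--     """Identify aligned interests between stakeholder groups."""
--     alignments = []
--
--     # Simple keyword-based alignment detection
--     for interest1 in interests1:
--         for interest2 in interests2:
--             # Check for similar words/concepts
--             words1 = set(interest1.lower().split())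
--             words2 = set(interest2.lower().split())
--
--             if len(words1.intersection(words2)) >= 1:
--                 alignments.append(f"{interest1} + {interest2}")
--
--     return alignments
-- ===== SOURCE B (Python) =====
-- def _identify_interest_alignments(interests1, interests2):
--     """Identify aligned interests between stakeholder groups."""
--     # Inverted index: word -> set of positions in interests2 containing it
--     index = {}
--     for j, interest2 in enumerate(interests2):
--         for w in interest2.lower().split():
--             index.setdefault(w, set()).add(j)
--
--     alignments = []
--     for interest1 in interests1:
--         hits = set()
--         for w in interest1.lower().split():
--             hits |= index.get(w, set())
--         for j, interest2 in enumerate(interests2):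
--             if j in hits:
--                 alignments.append(f"{interest1} + {interest2}")
--     return alignments
-- ===== Notes on version B (the rewrite author's own statement) =====
-- stated objective: faster
-- what changed: Builds an inverted index word->set of interests2 positions once, then for each interest1 unions the index entries of its words and emits matches by position, instead of tokenizing and intersecting word sets for every (interest1, interest2) pair.
import Mathlib
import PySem

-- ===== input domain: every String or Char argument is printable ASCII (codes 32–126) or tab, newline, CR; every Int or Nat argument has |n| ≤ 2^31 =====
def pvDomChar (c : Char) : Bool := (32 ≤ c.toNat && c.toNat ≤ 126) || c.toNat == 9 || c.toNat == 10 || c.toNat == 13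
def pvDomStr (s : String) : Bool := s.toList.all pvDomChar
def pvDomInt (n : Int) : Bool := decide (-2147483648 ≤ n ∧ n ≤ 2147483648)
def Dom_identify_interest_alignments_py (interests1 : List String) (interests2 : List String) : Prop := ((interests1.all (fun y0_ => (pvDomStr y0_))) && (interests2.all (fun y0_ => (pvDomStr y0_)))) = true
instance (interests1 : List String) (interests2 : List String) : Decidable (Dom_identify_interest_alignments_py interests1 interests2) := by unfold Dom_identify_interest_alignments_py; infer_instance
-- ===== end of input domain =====

-- B replaces the per-pair word-set intersection with an inverted index built once over interests2
-- (word -> set of positions), then emits matches per interest1 by position; faster when many words repeat.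

-- ===== PORT A =====
def identify_interest_alignments_py (interests1 : List String) (interests2 : List String) : List String :=
  interests1.foldl (fun alignments interest1 =>
    interests2.foldl (fun alignments interest2 =>
      let words1 := PySem.Set.ofList (PySem.Str.split₀ (PySem.Str.lower interest1))
      let words2 := PySem.Set.ofList (PySem.Str.split₀ (PySem.Str.lower interest2))
      if 1 ≤ PySem.Set.len (PySem.Set.inter words1 words2) then
        alignments ++ [PySem.Str.join " + " [interest1, interest2]]
      else alignments) alignments) []

-- ===== PORT B =====
-- B-side helpers (mirror Source B's phases: tokenize, build the inverted index, query it)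
def pvWords (s : String) : List String := PySem.Str.split₀ (PySem.Str.lower s)

def pvIndexStep (d : PySem.Dict String (PySem.Set Int)) (p : Int × String) : PySem.Dict String (PySem.Set Int) :=
  (pvWords p.2).foldl (fun d w => d.insert w (PySem.Set.add (d.getD w PySem.Set.empty) p.1)) d

def pvBuildIndex (interests2 : List String) : PySem.Dict String (PySem.Set Int) :=
  (PySem.List.enumerate interests2 0).foldl pvIndexStep PySem.Dict.empty

def identify_interest_alignments_py_alt (interests1 : List String) (interests2 : List String) : List String :=
  let index := pvBuildIndex interests2
  interests1.foldl (fun alignments interest1 =>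
    let hits := (pvWords interest1).foldl
      (fun s w => PySem.Set.union s (index.getD w PySem.Set.empty)) PySem.Set.empty
    (PySem.List.enumerate interests2 0).foldl (fun alignments p =>
      if PySem.Set.contains hits p.1 then
        alignments ++ [PySem.Str.join " + " [interest1, p.2]]
      else alignments) alignments) []

-- ===== PRECONDITION & SPEC =====
def Spec_identify_interest_alignments_py (interests1 : List String) (interests2 : List String) (out : List String) : Prop := out = identify_interest_alignments_py_alt interests1 interests2
instance (interests1 : List String) (interests2 : List String) (out : List String) : Decidable (Spec_identify_interest_alignments_py interests1 interests2 out) := by unfold Spec_identify_interest_alignments_py; infer_instance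

-- ===== CLAIM (what is proved, stated in full; the proofs are below) =====
def Claim_equal_identify_interest_alignments_py : Prop := ∀ (interests1 : List String) (interests2 : List String), Dom_identify_interest_alignments_py interests1 interests2 → Spec_identify_interest_alignments_py interests1 interests2 (identify_interest_alignments_py interests1 interests2)

-- ===== LEMMAS AND PROOFS =====

-- membership in the union-accumulating fold that computes `hits`
lemma pv_mem_union_foldl (g : String → PySem.Set Int) :
    ∀ (ws : List String) (s : PySem.Set Int) (j : Int),
      j ∈ ws.foldl (fun s w => PySem.Set.union s (g w)) s ↔ j ∈ s ∨ ∃ w ∈ ws, j ∈ g w := by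
  intro ws
  induction ws with
  | nil => simp
  | cons w ws ih =>
    intro s j
    simp [List.foldl_cons, ih, PySem.Set.mem_union]
    tauto

-- membership in the index after inserting one (position, interest) entry
lemma pv_getD_indexStep (p : Int × String) :
    ∀ (ws : List String) (d : PySem.Dict String (PySem.Set Int)) (w : String) (j : Int),
      (j ∈ (ws.foldl (fun d w' => d.insert w' (PySem.Set.add (d.getD w' PySem.Set.empty) p.1)) d).getD w PySem.Set.empty
        ↔ j ∈ d.getD w PySem.Set.empty ∨ (w ∈ ws ∧ j = p.1)) := by
  intro ws
  induction ws with
  | nil => simp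
  | cons w' ws ih =>
    intro d w j
    simp only [List.foldl_cons, ih, PySem.Dict.getD_insert, List.mem_cons]
    by_cases h : w = w' <;> simp [h, PySem.Set.mem_add] <;> tauto

-- membership in the fully built index
lemma pv_getD_buildFold :
    ∀ (l : List (Int × String)) (d : PySem.Dict String (PySem.Set Int)) (w : String) (j : Int),
      (j ∈ (l.foldl pvIndexStep d).getD w PySem.Set.empty
        ↔ j ∈ d.getD w PySem.Set.empty ∨ ∃ p ∈ l, p.1 = j ∧ w ∈ pvWords p.2) := by
  intro l
  induction l with
  | nil => simp
  | cons p l ih =>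
    intro d w j
    simp only [List.foldl_cons, ih, List.mem_cons]
    simp only [pvIndexStep]
    rw [pv_getD_indexStep p]
    constructor
    · rintro ((h | ⟨hw, hj⟩) | ⟨q, hq, h1, h2⟩)
      · exact Or.inl h
      · exact Or.inr ⟨p, Or.inl rfl, hj.symm, hw⟩
      · exact Or.inr ⟨q, Or.inr hq, h1, h2⟩
    · rintro (h | ⟨q, hq | hq, h1, h2⟩)
      · exact Or.inl (Or.inl h)
      · subst hq; exact Or.inl (Or.inr ⟨h2, h1.symm⟩)
      · exact Or.inr ⟨q, hq, h1, h2⟩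

-- A's match test is "some word is shared"
lemma pv_match_iff (a b : String) :
    1 ≤ PySem.Set.len (PySem.Set.inter (PySem.Set.ofList (PySem.Str.split₀ (PySem.Str.lower a)))
        (PySem.Set.ofList (PySem.Str.split₀ (PySem.Str.lower b))))
      ↔ ∃ w ∈ pvWords a, w ∈ pvWords b := by
  unfold pvWords
  constructor
  · intro h
    have hne : PySem.Set.inter (PySem.Set.ofList (PySem.Str.split₀ (PySem.Str.lower a)))
        (PySem.Set.ofList (PySem.Str.split₀ (PySem.Str.lower b))) ≠ [] := by
      intro hnil
      rw [PySem.Set.len, hnil] at h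
      simp at h
    obtain ⟨w, hw⟩ := List.exists_mem_of_ne_nil _ hne
    rw [PySem.Set.mem_inter, PySem.Set.mem_ofList, PySem.Set.mem_ofList] at hw
    exact ⟨w, hw.1, hw.2⟩
  · rintro ⟨w, h1, h2⟩
    have hw : w ∈ PySem.Set.inter (PySem.Set.ofList (PySem.Str.split₀ (PySem.Str.lower a)))
        (PySem.Set.ofList (PySem.Str.split₀ (PySem.Str.lower b))) := by
      rw [PySem.Set.mem_inter, PySem.Set.mem_ofList, PySem.Set.mem_ofList]; exact ⟨h1, h2⟩
    rw [PySem.Set.len]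
    have := List.length_pos_of_mem hw
    omega

-- filter over an enumerate equals a filter over the list when the tests agree pointwise
lemma pv_filtermap_enumerate {α β : Type} (f : α → β) :
    ∀ (l : List α) (s : Int) (c : Int × α → Bool) (q : α → Bool),
      (∀ (k : Nat) (hk : k < l.length), c (s + k, l[k]) = q l[k]) →
      ((PySem.List.enumerate l s).filter c).map (fun p => f p.2) = (l.filter q).map f := by
  intro l
  induction l with
  | nil => simp [PySem.List.enumerate_nil]
  | cons x xs ih =>
    intro s c q h
    rw [PySem.List.enumerate_cons]
    have h0 : c (s, x) = q x := by
      have := h 0 (by simp)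
      simpa using this
    have hrest := ih (s + 1) c q (by
      intro k hk
      have := h (k + 1) (by simpa using Nat.succ_lt_succ hk)
      simpa [add_assoc, add_comm, add_left_comm] using this)
    rw [List.filter_cons, List.filter_cons, h0]
    by_cases hc : q x = true
    · rw [if_pos hc, if_pos hc]
      simp [hrest]
    · rw [if_neg hc, if_neg hc]
      exact hrest

-- the two inner loops agree for each interest1
lemma pv_inner_eq (i2 : List String) (a : String) (acc : List String) :
    i2.foldl (fun alignments b =>
      if 1 ≤ PySem.Set.len (PySem.Set.inter (PySem.Set.ofList (PySem.Str.split₀ (PySem.Str.lower a)))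
          (PySem.Set.ofList (PySem.Str.split₀ (PySem.Str.lower b)))) then
        alignments ++ [PySem.Str.join " + " [a, b]]
      else alignments) acc
    = (PySem.List.enumerate i2 0).foldl (fun alignments p =>
        if PySem.Set.contains ((pvWords a).foldl
            (fun s w => PySem.Set.union s ((pvBuildIndex i2).getD w PySem.Set.empty)) PySem.Set.empty) p.1 then
          alignments ++ [PySem.Str.join " + " [a, p.2]]
        else alignments) acc := by
  rw [PySem.List.foldl_append_ite
      (p := fun b => 1 ≤ PySem.Set.len (PySem.Set.inter (PySem.Set.ofList (PySem.Str.split₀ (PySem.Str.lower a)))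
        (PySem.Set.ofList (PySem.Str.split₀ (PySem.Str.lower b)))))
      (f := fun b => PySem.Str.join " + " [a, b]),
    PySem.List.foldl_append_if
      (p := fun p : Int × String => PySem.Set.contains ((pvWords a).foldl
        (fun s w => PySem.Set.union s ((pvBuildIndex i2).getD w PySem.Set.empty)) PySem.Set.empty) p.1)
      (f := fun p : Int × String => PySem.Str.join " + " [a, p.2])]
  congr 1
  rw [pv_filtermap_enumerate (fun b => PySem.Str.join " + " [a, b]) i2 0 _ _ ?_]
  intro k hk
  rw [Bool.eq_iff_iff]
  simp only [decide_eq_true_eq]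
  rw [show PySem.Set.contains _ ((0:Int) + (k:Int)) = true ↔ ((0:Int) + (k:Int)) ∈
      ((pvWords a).foldl (fun s w => PySem.Set.union s ((pvBuildIndex i2).getD w PySem.Set.empty)) PySem.Set.empty)
    from PySem.Set.contains_iff _ _]
  rw [pv_mem_union_foldl]
  rw [pv_match_iff]
  unfold pvBuildIndex
  constructor
  · rintro (h | ⟨w, hw, hmem⟩)
    · exact absurd h (by simp [PySem.Set.empty])
    · rw [pv_getD_buildFold] at hmem
      rcases hmem with h | ⟨p, hp, h1, h2⟩
      · exact absurd h (by simp [PySem.Dict.getD_empty, PySem.Set.empty])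
      · rw [PySem.List.mem_enumerate_iff] at hp
        obtain ⟨m, hm, rfl⟩ := hp
        have hmk : m = k := by exact_mod_cast (by simpa using h1 : ((m:Int)) = (k:Int))
        subst hmk
        exact ⟨w, hw, h2⟩
  · rintro ⟨w, hw, hmem⟩
    right
    refine ⟨w, hw, ?_⟩
    rw [pv_getD_buildFold]
    right
    exact ⟨((0:Int) + (k:Int), i2[k]), by
      rw [PySem.List.mem_enumerate_iff]; exact ⟨k, hk, rfl⟩, rfl, hmem⟩

-- ===== VERDICT (by name: the statement is the Claim_ definition above) =====
theorem identify_interest_alignments_py_spec : Claim_equal_identify_interest_alignments_py := by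
  intro i1 i2 _
  unfold Spec_identify_interest_alignments_py identify_interest_alignments_py identify_interest_alignments_py_alt
  simp only []
  congr 1
  funext acc a
  exact pv_inner_eq i2 a acc
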